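-- pv_equiv track=rewrite | github.com/ikokkari/PythonProblems | labs109.py | palindrome_split
-- ===== SOURCE A (Python) =====
-- def palindrome_split(text):
--     n = len(text)
--     table = [0 for _ in range(n + 1)]
--     for i in range(n - 1, -1, -1):
--         best = 0
--         for j in range(i + 1, n + 1):
--             ii, jj = i, j - 1
--             while ii < jj and text[ii] == text[jj]:
--                 ii, jj = ii + 1, jj - 1
--             if ii >= jj:
--                 best = max(best, (j - i) * (j - i) + table[j])
--         table[i] = best
--     return table[0]
-- ===== SOURCE B (Python) =====
-- def palindrome_split(text):
--     # O(n^2): roll a palindrome row pal(i, j) down from i = n-1, fusing it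
--     # with the same max-of-squares DP, instead of A's O(n) two-pointer check
--     # per (i, j) pair.
--     n = len(text)
--     prev = [True]            # prev[k] = "text[i+1 : i+1+k] is a palindrome"
--     table = [0]              # table[k] = best score for suffix starting at i+1+k
--     for i in range(n - 1, -1, -1):
--         cur = []
--         best = 0
--         for j in range(i, n + 1):
--             d = j - i
--             if d <= 1:
--                 p = True
--             else:
--                 p = text[i] == text[j - 1] and prev[d - 2]
--             cur.append(p)
--             if d > 0 and p:
--                 v = d * d + table[d - 1]
--                 if v > best:
--                     best = v
--         table = [best] + table
--         prev = cur
--     return table[0]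
-- ===== Notes on version B (the rewrite author's own statement) =====
-- stated objective: faster
-- what changed: Replaces A's per-pair O(n) two-pointer palindrome scan with a rolling palindrome-interval row pal(i,j) = (text[i]==text[j-1] and pal(i+1,j-1)) computed in O(1) per pair and fused into the same max-of-squares suffix DP.
import Mathlib
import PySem

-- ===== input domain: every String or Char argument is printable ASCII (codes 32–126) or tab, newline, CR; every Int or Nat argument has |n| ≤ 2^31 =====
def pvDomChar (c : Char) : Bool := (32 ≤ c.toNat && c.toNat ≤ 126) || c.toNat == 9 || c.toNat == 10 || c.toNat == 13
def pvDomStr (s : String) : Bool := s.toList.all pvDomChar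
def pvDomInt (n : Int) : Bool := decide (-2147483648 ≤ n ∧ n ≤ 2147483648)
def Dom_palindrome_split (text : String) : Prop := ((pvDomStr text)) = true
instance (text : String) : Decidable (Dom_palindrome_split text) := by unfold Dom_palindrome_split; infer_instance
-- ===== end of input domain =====

-- B replaces A's O(n) two-pointer palindrome scan per (i,j) with a rolling
-- palindrome row updated in O(1) per pair, fused into the same suffix DP (faster: O(n^2) vs O(n^3)).

-- ===== PORT A =====
-- All character indices reached by either port are provably in range, so
-- text[x] is ported as c.getD x 'a' (exact on in-range indices).

-- the `while ii < jj and text[ii] == text[jj]` loop, returning the final (ii, jj)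
def pvA_while (c : List Char) (ii jj : Nat) : Nat × Nat :=
  if h : ii < jj ∧ c.getD ii 'a' = c.getD jj 'a' then pvA_while c (ii + 1) (jj - 1)
  else (ii, jj)
termination_by jj - ii
decreasing_by omega

-- the inner `for j in range(i+1, n+1)` loop computing `best`
def pvA_best (c : List Char) (n i : Nat) (t : Nat → Int) : Int :=
  (List.range' (i + 1) (n - i)).foldl (fun best j =>
    let r := pvA_while c i (j - 1)
    if r.2 ≤ r.1 then max best (((j : Int) - (i : Int)) * ((j : Int) - (i : Int)) + t j)
    else best) 0

-- the outer `for i in range(n-1, -1, -1)` loop; k = number of rows already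
-- processed, so step k+1 handles i = n-1-k; the table is kept as a function
def pvA_outer (c : List Char) (n : Nat) : Nat → (Nat → Int)
  | 0 => fun _ => 0
  | k + 1 =>
    let t := pvA_outer c n k
    let i := n - 1 - k
    fun x => if x = i then pvA_best c n i t else t x

def palindrome_split (text : String) : Int :=
  let c := text.toList
  let n := c.length
  pvA_outer c n n 0

-- ===== PORT B =====
-- the inner `for j in range(i, n+1)` loop of Source B, carrying (cur, best)
def pvB_inner (c : List Char) (prev : List Bool) (table : List Int) (i n : Nat) :
    List Bool × Int :=
  (List.range' i (n + 1 - i)).foldl (fun st j =>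
    let d := j - i
    let p : Bool := if d ≤ 1 then true
      else decide (c.getD i 'a' = c.getD (j - 1) 'a') && prev.getD (d - 2) false
    (st.1 ++ [p],
     if 0 < d ∧ p = true then
       let v := (d : Int) * (d : Int) + table.getD (d - 1) 0
       if st.2 < v then v else st.2
     else st.2)) ([], 0)

-- the outer loop of Source B; state = (prev, table), step k+1 handles i = n-1-k
def pvB_outer (c : List Char) (n : Nat) : Nat → List Bool × List Int
  | 0 => ([true], [0])
  | k + 1 =>
    let st := pvB_outer c n k
    let i := n - 1 - k
    let r := pvB_inner c st.1 st.2 i n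
    (r.1, r.2 :: st.2)

def palindrome_split_alt (text : String) : Int :=
  let c := text.toList
  let n := c.length
  (pvB_outer c n n).2.headD 0

-- ===== PRECONDITION & SPEC =====
def Spec_palindrome_split (text : String) (out : Int) : Prop := out = palindrome_split_alt text
instance (text : String) (out : Int) : Decidable (Spec_palindrome_split text out) := by unfold Spec_palindrome_split; infer_instance

-- ===== CLAIM (what is proved, stated in full; the proofs are below) =====
def Claim_equal_palindrome_split : Prop := ∀ (text : String), Dom_palindrome_split text → Spec_palindrome_split text (palindrome_split text)

-- ===== LEMMAS AND PROOFS =====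

-- mathematical palindrome predicate both palindrome tests compute
def pvPal (c : List Char) (i j : Nat) : Bool :=
  if h : j ≤ i + 1 then true
  else decide (c.getD i 'a' = c.getD (j - 1) 'a') && pvPal c (i + 1) (j - 1)
termination_by j - i
decreasing_by omega

lemma pvPal_small (c : List Char) (i j : Nat) (h : j ≤ i + 1) : pvPal c i j = true := by
  rw [pvPal]; simp [h]

lemma pvPal_step (c : List Char) (i j : Nat) (h : i + 1 < j) :
    pvPal c i j = (decide (c.getD i 'a' = c.getD (j - 1) 'a') && pvPal c (i + 1) (j - 1)) := by
  rw [pvPal]; simp [Nat.not_le.mpr h]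

-- A's two-pointer loop decides pvPal
lemma pvA_while_pal (c : List Char) (ii jj : Nat) :
    (decide ((pvA_while c ii jj).2 ≤ (pvA_while c ii jj).1)) = pvPal c ii (jj + 1) := by
  induction ii, jj using pvA_while.induct c with
  | case1 ii jj h ih =>
    rw [pvA_while, dif_pos h, ih, pvPal_step c ii (jj + 1) (by omega)]
    rw [show jj - 1 + 1 = jj from by omega, Nat.add_sub_cancel,
      decide_eq_true h.2, Bool.true_and]
  | case2 ii jj h =>
    rw [pvA_while, dif_neg h]
    by_cases hlt : ii < jj
    · have hne : ¬ c.getD ii 'a' = c.getD jj 'a' := fun he => h ⟨hlt, he⟩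
      rw [pvPal_step c ii (jj + 1) (by omega), Nat.add_sub_cancel,
        decide_eq_false hne, Bool.false_and, decide_eq_false (by omega)]
    · rw [pvPal_small c ii (jj + 1) (by omega)]
      simp; omega

-- splitting a fold over a pair with independent components
lemma foldl_prod_split {α β γ : Type} (f : α → γ → α) (g : β → γ → β)
    (l : List γ) (a : α) (b : β) :
    l.foldl (fun st j => (f st.1 j, g st.2 j)) (a, b) = (l.foldl f a, l.foldl g b) := by
  induction l generalizing a b with
  | nil => rfl
  | cons x xs ih => simp [List.foldl, ih]

-- an append-accumulating fold is a map
lemma foldl_append_map {γ δ : Type} (h : γ → δ) (l : List γ) (a : List δ) :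
    l.foldl (fun acc j => acc ++ [h j]) a = a ++ l.map h := by
  induction l generalizing a with
  | nil => simp
  | cons x xs ih => simp [List.foldl, ih]

lemma getD_map_range' {δ : Type} (h : Nat → δ) (s m d : Nat) (dv : δ) (hd : d < m) :
    ((List.range' s m).map h).getD d dv = h (s + d) := by
  rw [List.getD_eq_getElem?_getD]
  simp [hd]

-- the palindrome bit computed by Source B's inner loop, and its best-update step
def pvPf (c : List Char) (prev : List Bool) (i j : Nat) : Bool :=
  if j - i ≤ 1 then true
  else decide (c.getD i 'a' = c.getD (j - 1) 'a') && prev.getD (j - i - 2) false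

def pvGstep (c : List Char) (prev : List Bool) (table : List Int) (i : Nat)
    (b : Int) (j : Nat) : Int :=
  if 0 < j - i ∧ pvPf c prev i j = true then
    let v := ((j - i : Nat) : Int) * ((j - i : Nat) : Int) + table.getD (j - i - 1) 0
    if b < v then v else b
  else b

lemma pvB_inner_eq (c : List Char) (prev : List Bool) (table : List Int) (i n : Nat) :
    pvB_inner c prev table i n =
      ((List.range' i (n + 1 - i)).map (pvPf c prev i),
       (List.range' i (n + 1 - i)).foldl (pvGstep c prev table i) 0) := by
  refine (foldl_prod_split (fun a j => a ++ [pvPf c prev i j])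
    (pvGstep c prev table i) (List.range' i (n + 1 - i)) [] 0).trans ?_
  rw [foldl_append_map]
  simp

lemma headD_eq_getD {δ : Type} (l : List δ) (d : δ) : l.headD d = l.getD 0 d := by
  cases l <;> rfl

-- the joint invariant relating B's state after k rows to A's table function
lemma pv_inv (c : List Char) (n k : Nat) (hk : k ≤ n) :
    (pvB_outer c n k).1.length = k + 1 ∧
    (∀ d, d ≤ k → (pvB_outer c n k).1.getD d false = pvPal c (n - k) (n - k + d)) ∧
    (∀ d, d ≤ k → (pvB_outer c n k).2.getD d 0 = pvA_outer c n k (n - k + d)) := by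
  induction k with
  | zero =>
    refine ⟨rfl, ?_, ?_⟩ <;> intro d hd <;> interval_cases d
    · exact (pvPal_small c n (n + 0) (by omega)).symm
    · rfl
  | succ k ih =>
    obtain ⟨hlen, hprev, htbl⟩ := ih (by omega)
    have hkn : k < n := by omega
    set prev := (pvB_outer c n k).1 with hprevdef
    set tbl := (pvB_outer c n k).2 with htbldef
    set i := n - 1 - k with hidef
    have hni : n + 1 - i = k + 2 := by omega
    have hnk1 : n - (k + 1) = i := by omega
    have hnk : n - k = i + 1 := by omega
    -- the palindrome bits produced this round are exactly pvPal c i ·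
    have hpf : ∀ d, d ≤ k + 1 → pvPf c prev i (i + d) = pvPal c i (i + d) := by
      intro d hd
      unfold pvPf
      by_cases h1 : d ≤ 1
      · rw [if_pos (by omega), pvPal_small c i (i + d) (by omega)]
      · rw [if_neg (by omega), pvPal_step c i (i + d) (by omega)]
        have : i + d - i - 2 = d - 2 := by omega
        rw [this, hprev (d - 2) (by omega), hnk]
        have h2 : i + 1 + (d - 2) = i + d - 1 := by omega
        rw [h2]
    -- this round's best equals A's inner loop at row i
    have hbest : (List.range' i (n + 1 - i)).foldl (pvGstep c prev tbl i) 0 =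
        pvA_best c n i (pvA_outer c n k) := by
      rw [hni, List.range'_succ, List.foldl_cons]
      have h0 : pvGstep c prev tbl i 0 i = 0 := by
        unfold pvGstep; rw [if_neg (by omega)]
      rw [h0]
      unfold pvA_best
      rw [show n - i = k + 1 from by omega]
      apply PySem.List.foldl_congr_mem
      intro b j hj
      rw [List.mem_range'_1] at hj
      have hij : i + 1 ≤ j ∧ j ≤ i + 1 + k := ⟨hj.1, by omega⟩
      have hpal : pvPf c prev i j = pvPal c i j := by
        have := hpf (j - i) (by omega)
        rwa [show i + (j - i) = j from by omega] at this
      have hwhile : decide ((pvA_while c i (j - 1)).2 ≤ (pvA_while c i (j - 1)).1)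
          = pvPal c i j := by
        rw [pvA_while_pal, show j - 1 + 1 = j from by omega]
      unfold pvGstep
      rw [hpal]
      have htj : tbl.getD (j - i - 1) 0 = pvA_outer c n k j := by
        rw [htbl (j - i - 1) (by omega), hnk, show i + 1 + (j - i - 1) = j from by omega]
      by_cases hp : pvPal c i j = true
      · rw [if_pos ⟨by omega, hp⟩]
        have hc : (pvA_while c i (j - 1)).2 ≤ (pvA_while c i (j - 1)).1 := by
          have := hwhile; rw [hp] at this; exact of_decide_eq_true this
        rw [if_pos hc, htj]
        have hcast : ((j - i : Nat) : Int) = (j : Int) - (i : Int) := by omega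
        rw [hcast]
        by_cases h : (((j : Int) - i) * ((j : Int) - i) + pvA_outer c n k j) ≤ b
        · rw [if_neg (by omega), max_eq_left h]
        · rw [if_pos (by omega), max_eq_right (by omega)]
      · rw [if_neg (by simp [hp]), if_neg ?_]
        intro hc
        exact hp (by rw [← hwhile, decide_eq_true hc])
    have hstep : pvB_outer c n (k + 1) =
        ((List.range' i (n + 1 - i)).map (pvPf c prev i),
         pvA_best c n i (pvA_outer c n k) :: tbl) := by
      show ((pvB_inner c prev tbl i n).1, (pvB_inner c prev tbl i n).2 :: tbl) = _
      rw [pvB_inner_eq, hbest]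
    rw [hstep]
    refine ⟨?_, ?_, ?_⟩
    · simp [hni]
    · intro d hd
      rw [hnk1, getD_map_range' _ _ _ _ _ (by omega), hpf d hd]
    · intro d hd
      rw [hnk1]
      cases d with
      | zero =>
        show pvA_best c n i (pvA_outer c n k) = pvA_outer c n (k + 1) (i + 0)
        show _ = if i + 0 = n - 1 - k then _ else _
        rw [if_pos (by omega)]
      | succ d =>
        show tbl.getD d 0 = pvA_outer c n (k + 1) (i + (d + 1))
        show _ = if i + (d + 1) = n - 1 - k then _ else pvA_outer c n k (i + (d + 1))
        rw [if_neg (by omega), htbl d (by omega), hnk,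
          show i + 1 + d = i + (d + 1) from by omega]

theorem pv_main (text : String) : palindrome_split text = palindrome_split_alt text := by
  unfold palindrome_split palindrome_split_alt
  obtain ⟨-, -, htbl⟩ := pv_inv text.toList text.toList.length text.toList.length le_rfl
  rw [headD_eq_getD, htbl 0 (by omega), Nat.sub_self]

-- ===== VERDICT (by name: the statement is the Claim_ definition above) =====
theorem palindrome_split_spec : Claim_equal_palindrome_split := by
  intro text _
  unfold Spec_palindrome_split
  exact pv_main text
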